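-- pv_equiv track=rewrite | github.com/mohammadfaiizan/ProjectI | DSA/Dynamic_Programming/011_dp_intervals.py | rod_cutting_with_constraints
-- ===== SOURCE A (Python) =====
-- from typing import List, Dict, Tuple, Optional
--
-- def rod_cutting_with_constraints(length: int, prices: List[int],
--                                max_cuts: int) -> int:
--     """
--     Rod cutting with maximum number of cuts constraint
--
--     Args:
--         length: Length of rod
--         prices: Price array where prices[i] is price of rod of length i+1
--         max_cuts: Maximum number of cuts allowed
--
--     Returns:
--         Maximum revenue with cut constraint
--     """
--     # dp[i][j] = max revenue for rod of length i with at most j cuts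
--     dp = [[0] * (max_cuts + 1) for _ in range(length + 1)]
--
--     for i in range(1, length + 1):
--         for j in range(max_cuts + 1):
--             # Don't cut (use full length)
--             if i <= len(prices):
--                 dp[i][j] = max(dp[i][j], prices[i - 1])
--
--             # Try cutting at each position
--             if j > 0:
--                 for cut_pos in range(1, i):
--                     if cut_pos <= len(prices):
--                         dp[i][j] = max(dp[i][j],
--                                      prices[cut_pos - 1] + dp[i - cut_pos][j - 1])
--
--     return dp[length][max_cuts]
-- ===== SOURCE B (Python) =====
-- from typing import List
--
-- def rod_cutting_with_constraints(length: int, prices: List[int],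
--                                max_cuts: int) -> int:
--     """Two-phase demand-driven evaluation: first discover, top-down, the set of
--     rod lengths actually reachable at each remaining-cut level (stopping as soon
--     as the frontier empties); then combine values bottom-up over only those
--     discovered frontiers, each level held in a dict."""
--     n = len(prices)
--
--     def base(i):
--         # revenue of selling a rod of length i whole (no cuts)
--         return max(0, prices[i - 1]) if 1 <= i <= n else 0
--
--     # phase 1: frontiers of reachable lengths, one per spent cut
--     frontiers = []
--     need = {length}
--     j = max_cuts
--     while j > 0 and need:
--         frontiers.append(need)
--         need = {i - c for i in need for c in range(1, i) if c <= n}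
--         j -= 1
--
--     # phase 2: evaluate upward; vals maps a reachable length to its best revenue
--     vals = {i: base(i) for i in need}
--     for frontier in reversed(frontiers):
--         prev = vals
--         vals = {}
--         for i in frontier:
--             best = base(i)
--             for c in range(1, i):
--                 if c <= n:
--                     best = max(best, prices[c - 1] + prev[i - c])
--             vals[i] = best
--     return vals[length]
-- ===== Notes on version B (the rewrite author's own statement) =====
-- stated objective: alternative
-- what changed: Replaces A's bottom-up 2D table filled by triple nested loops over all (length, cuts) cells with a two-phase demand-driven evaluation: a top-down pass discovers the set of rod lengths reachable at each remaining-cut level (stopping when the frontier empties, e.g. when more cuts are allowed than ever usable), then values are combined bottom-up over only those discovered frontiers, held in per-level dicts.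
-- outside the precondition, e.g. on rod_cutting_with_constraints(2, [3, 1], -1): A raises IndexError, B returns 1; on rod_cutting_with_constraints(-1, [2], 1): A raises IndexError, B returns 0
import Mathlib
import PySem

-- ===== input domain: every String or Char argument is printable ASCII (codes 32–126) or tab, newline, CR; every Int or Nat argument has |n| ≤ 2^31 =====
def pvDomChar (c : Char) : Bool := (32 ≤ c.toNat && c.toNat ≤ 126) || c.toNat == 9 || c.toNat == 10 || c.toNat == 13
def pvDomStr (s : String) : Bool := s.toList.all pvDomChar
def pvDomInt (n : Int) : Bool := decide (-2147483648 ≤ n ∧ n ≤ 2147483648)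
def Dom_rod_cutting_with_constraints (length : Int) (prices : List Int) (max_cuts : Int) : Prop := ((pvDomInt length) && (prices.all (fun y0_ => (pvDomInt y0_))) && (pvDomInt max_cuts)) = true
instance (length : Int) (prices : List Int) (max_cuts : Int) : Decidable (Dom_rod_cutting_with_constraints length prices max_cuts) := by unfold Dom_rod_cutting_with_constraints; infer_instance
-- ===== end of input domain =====

-- B replaces A's bottom-up 2D table (triple nested loops over all cells) by a two-phase
-- demand-driven evaluation: top-down discovery of the reachable lengths per remaining-cut
-- level, then bottom-up combination over only those frontiers (objective: alternative).

-- ===== PORT A =====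
-- the 2D list-of-lists dp table; rccGet dp i j = dp[i][j], rccPut dp i j v = "dp[i][j] = v"
def rccGet (dp : List (List Int)) (i j : Nat) : Int := (dp.getD i []).getD j 0

def rccPut (dp : List (List Int)) (i j : Nat) (v : Int) : List (List Int) :=
  dp.set i ((dp.getD i []).set j v)

def rod_cutting_with_constraints (length : Int) (prices : List Int) (max_cuts : Int) : Int :=
  let n := prices.length
  let L := length.toNat
  let M := max_cuts.toNat
  -- dp = [[0] * (max_cuts + 1) for _ in range(length + 1)]
  let dp : List (List Int) := List.replicate (L+1) (List.replicate (M+1) 0)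
  let dp := (List.range' 1 L).foldl (fun dp i =>
    (List.range (M+1)).foldl (fun dp j =>
      let dp1 := if i ≤ n then rccPut dp i j (max (rccGet dp i j) (prices.getD (i-1) 0)) else dp
      if 0 < j then
        (List.range' 1 (i-1)).foldl (fun dp c =>
          if c ≤ n then rccPut dp i j (max (rccGet dp i j) (prices.getD (c-1) 0 + rccGet dp (i-c) (j-1))) else dp) dp1
      else dp1) dp) dp
  rccGet dp L M

-- ===== PORT B =====
-- base(i) of Source B: revenue of selling a rod of length i whole (index valid under the guard)
def rccBase (prices : List Int) (i : Int) : Int :=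
  if 1 ≤ i ∧ i ≤ (prices.length : Int) then max 0 ((PySem.List.pyGet? prices (i - 1)).getD 0) else 0

-- the set comprehension {i - c for i in need for c in range(1, i) if c <= n}
def rccNext (n : Int) (need : PySem.Set Int) : PySem.Set Int :=
  PySem.Set.ofList (need.foldl (fun acc i =>
    (PySem.List.pyRange 1 i 1).foldl (fun acc c => if c ≤ n then acc ++ [i - c] else acc) acc) [])

-- phase 1 while-loop: frontiers of reachable lengths, one per spent cut, and the final need
def rccFrontiers (n : Int) (j : Int) (need : PySem.Set Int) : List (PySem.Set Int) × PySem.Set Int :=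
  if h : 0 < j ∧ need ≠ [] then
    let res := rccFrontiers n (j - 1) (rccNext n need)
    (need :: res.1, res.2)
  else ([], need)
termination_by j.toNat
decreasing_by omega

-- the inner combination loop of phase 2 (prev[i-c] is always present; getD is never the default)
def rccCombine (prices : List Int) (prev : PySem.Dict Int Int) (i : Int) : Int :=
  (PySem.List.pyRange 1 i 1).foldl
    (fun best c => if c ≤ (prices.length : Int)
      then max best ((PySem.List.pyGet? prices (c - 1)).getD 0 + prev.getD (i - c) 0)
      else best)
    (rccBase prices i)

def rod_cutting_with_constraints_alt (length : Int) (prices : List Int) (max_cuts : Int) : Int :=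
  let n : Int := prices.length
  let fr := rccFrontiers n max_cuts (PySem.Set.ofList [length])
  let vals0 := fr.2.foldl (fun d i => PySem.Dict.insert d i (rccBase prices i)) PySem.Dict.empty
  let vals := fr.1.reverse.foldl
    (fun prev frontier =>
      frontier.foldl (fun vals i => PySem.Dict.insert vals i (rccCombine prices prev i)) PySem.Dict.empty)
    vals0
  ((vals.get? length).getD 0)  -- vals[length]: the key is always present inside Pre_

-- ===== PRECONDITION & SPEC =====
-- A raises IndexError when length < 0 (dp has no row `length`) or max_cuts < 0 (each row is
-- indexed past its end); exactly those inputs are excluded, nothing else.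
def Pre_rod_cutting_with_constraints (length : Int) (prices : List Int) (max_cuts : Int) : Prop :=
  0 ≤ length ∧ 0 ≤ max_cuts

instance (length : Int) (prices : List Int) (max_cuts : Int) : Decidable (Pre_rod_cutting_with_constraints length prices max_cuts) := by unfold Pre_rod_cutting_with_constraints; infer_instance

def pvWitness_rod_cutting_with_constraints : Int × List Int × Int := (4, [1, 5, 8, 9], 2)

def Spec_rod_cutting_with_constraints (length : Int) (prices : List Int) (max_cuts : Int) (out : Int) : Prop := out = rod_cutting_with_constraints_alt length prices max_cuts
instance (length : Int) (prices : List Int) (max_cuts : Int) (out : Int) : Decidable (Spec_rod_cutting_with_constraints length prices max_cuts out) := by unfold Spec_rod_cutting_with_constraints; infer_instance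

-- ===== CLAIM (what is proved, stated in full; the proofs are below) =====
def Claim_equal_rod_cutting_with_constraints : Prop := ∀ (length : Int) (prices : List Int) (max_cuts : Int), Dom_rod_cutting_with_constraints length prices max_cuts → Pre_rod_cutting_with_constraints length prices max_cuts → Spec_rod_cutting_with_constraints length prices max_cuts (rod_cutting_with_constraints length prices max_cuts)

-- ===== LEMMAS AND PROOFS =====

-- function view of the table, used only by the proofs
def rccSet (f : Nat → Nat → Int) (i j : Nat) (v : Int) : Nat → Nat → Int :=
  fun a b => if a = i ∧ b = j then v else f a b

-- best revenue for a rod of length i with at most j cuts (the recurrence both programs compute)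
def rccB1 (prices : List Int) (i : Nat) : Int :=
  if i ≤ prices.length then max 0 (prices.getD (i-1) 0) else 0

def rccBest (prices : List Int) : Nat → Nat → Int
  | 0, i => if i = 0 then 0 else rccB1 prices i
  | j+1, i => if i = 0 then 0 else
      (List.range' 1 (i-1)).foldl
        (fun acc c => if c ≤ prices.length then max acc (prices.getD (c-1) 0 + rccBest prices j (i-c)) else acc)
        (rccB1 prices i)

theorem rccBest_zero_len (prices : List Int) (j : Nat) : rccBest prices j 0 = 0 := by
  cases j <;> simp [rccBest]

theorem rccSet_self (f : Nat → Nat → Int) (i j : Nat) : rccSet f i j (f i j) = f := by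
  funext a b; simp only [rccSet]; split
  · rename_i h; rw [h.1, h.2]
  · rfl

theorem rccSet_get (f : Nat → Nat → Int) (i j : Nat) (v : Int) : rccSet f i j v i j = v := by
  simp [rccSet]

theorem rccSet_get_ne (f : Nat → Nat → Int) (i j a b : Nat) (v : Int) (h : ¬ (a = i ∧ b = j)) :
    rccSet f i j v a b = f a b := by
  simp only [rccSet]; rw [if_neg h]

theorem rccSet_get_lt (f : Nat → Nat → Int) (i j a b : Nat) (v : Int) (h : a < i) :
    rccSet f i j v a b = f a b := by
  apply rccSet_get_ne; omega

theorem rccSet_rccSet (f : Nat → Nat → Int) (i j : Nat) (v w : Int) :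
    rccSet (rccSet f i j v) i j w = rccSet f i j w := by
  funext a b; simp only [rccSet]; split <;> rfl

-- A's cut-position fold only rewrites cell (i,j), accumulating the guarded max
theorem rcc_cfold (prices : List Int) (i j : Nat) :
    ∀ (cs : List Nat) (dp : Nat → Nat → Int),
      (∀ c ∈ cs, 1 ≤ c ∧ c < i) →
      (∀ a, a < i → dp a (j-1) = rccBest prices (j-1) a) →
      cs.foldl (fun dp c =>
          if c ≤ prices.length then rccSet dp i j (max (dp i j) (prices.getD (c-1) 0 + dp (i-c) (j-1))) else dp) dp
      = rccSet dp i j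
          (cs.foldl (fun acc c => if c ≤ prices.length then max acc (prices.getD (c-1) 0 + rccBest prices (j-1) (i-c)) else acc) (dp i j)) := by
  intro cs
  induction cs with
  | nil => intro dp _ _; simp [rccSet_self]
  | cons c cs ih =>
    intro dp hcs H
    have hc := hcs c (List.mem_cons_self)
    have hread : dp (i-c) (j-1) = rccBest prices (j-1) (i-c) := H _ (by omega)
    simp only [List.foldl_cons]
    by_cases hcl : c ≤ prices.length
    · simp only [hcl, if_true]
      rw [ih _ (fun c h => hcs c (List.mem_cons_of_mem _ h))
            (fun a ha => by rw [rccSet_get_lt _ _ _ _ _ _ ha]; exact H a ha)]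
      rw [rccSet_rccSet, rccSet_get, hread]
    · simp only [hcl, if_false]
      exact ih _ (fun c h => hcs c (List.mem_cons_of_mem _ h)) H

-- one iteration of A's j-loop body computes rccBest for cell (i,j)
theorem rcc_colstep (prices : List Int) (i j : Nat) (dp : Nat → Nat → Int)
    (hi : 1 ≤ i)
    (H : ∀ a, a < i → dp a (j-1) = rccBest prices (j-1) a)
    (h0 : dp i j = 0) :
    (if 0 < j then
        (List.range' 1 (i-1)).foldl (fun dp c =>
          if c ≤ prices.length then rccSet dp i j (max (dp i j) (prices.getD (c-1) 0 + dp (i-c) (j-1))) else dp)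
          (if i ≤ prices.length then rccSet dp i j (max (dp i j) (prices.getD (i-1) 0)) else dp)
      else if i ≤ prices.length then rccSet dp i j (max (dp i j) (prices.getD (i-1) 0)) else dp)
    = rccSet dp i j (rccBest prices j i) := by
  have hdp1 : (if i ≤ prices.length then rccSet dp i j (max (dp i j) (prices.getD (i-1) 0)) else dp)
      = rccSet dp i j (rccB1 prices i) := by
    by_cases h : i ≤ prices.length
    · simp [h, rccB1, h0]
    · rw [if_neg h]
      unfold rccB1
      rw [if_neg h]
      conv_rhs => rw [← h0]
      rw [rccSet_self]
  rw [hdp1]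
  have H1 : ∀ a, a < i → rccSet dp i j (rccB1 prices i) a (j-1) = rccBest prices (j-1) a := by
    intro a ha; rw [rccSet_get_lt _ _ _ _ _ _ ha]; exact H a ha
  cases j with
  | zero =>
    simp only [Nat.lt_irrefl, if_false]
    have : rccBest prices 0 i = rccB1 prices i := by
      simp [rccBest, show i ≠ 0 by omega]
    rw [this]
  | succ j' =>
    simp only [Nat.succ_pos, if_true]
    rw [rcc_cfold prices i (j'+1) _ _
        (by intro c hc; rw [List.mem_range'_1] at hc; omega) H1]
    rw [rccSet_rccSet, rccSet_get]
    simp only [Nat.add_sub_cancel]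
    have h1 : rccBest prices (j'+1) i
        = (List.range' 1 (i-1)).foldl
            (fun acc c => if c ≤ prices.length then max acc (prices.getD (c-1) 0 + rccBest prices j' (i-c)) else acc)
            (rccB1 prices i) := by
      simp [rccBest, show i ≠ 0 by omega]
    rw [h1]

-- A's j-loop over a duplicate-free list of columns ≤ M fills exactly those cells of row i
theorem rcc_jfold (prices : List Int) (M i : Nat) (hi : 1 ≤ i) :
    ∀ (js : List Nat) (dp : Nat → Nat → Int),
      js.Nodup →
      (∀ b ∈ js, b ≤ M) →
      (∀ a b, a < i → b ≤ M → dp a b = rccBest prices b a) →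
      (∀ b ∈ js, dp i b = 0) →
      js.foldl (fun (dp : Nat → Nat → Int) (j : Nat) =>
        if 0 < j then
          (List.range' 1 (i-1)).foldl (fun dp c =>
            if c ≤ prices.length then rccSet dp i j (max (dp i j) (prices.getD (c-1) 0 + dp (i-c) (j-1))) else dp)
            (if i ≤ prices.length then rccSet dp i j (max (dp i j) (prices.getD (i-1) 0)) else dp)
        else if i ≤ prices.length then rccSet dp i j (max (dp i j) (prices.getD (i-1) 0)) else dp) dp
      = fun a b => if a = i ∧ b ∈ js then rccBest prices b i else dp a b := by
  intro js
  induction js with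
  | nil => intro dp _ _ _ _; funext a b; simp
  | cons j js ih =>
    intro dp hnd hle H h0
    simp only [List.foldl_cons]
    rw [rcc_colstep prices i j dp hi
          (fun a ha => H a (j-1) ha (by have := hle j List.mem_cons_self; omega))
          (h0 j List.mem_cons_self)]
    rw [ih _ (List.Nodup.of_cons hnd)
          (fun b hb => hle b (List.mem_cons_of_mem _ hb))
          (fun a b ha hb => by rw [rccSet_get_lt _ _ _ _ _ _ ha]; exact H a b ha hb)
          (fun b hb => by
            have hbj : b ≠ j := by
              intro h; subst h; exact (List.nodup_cons.mp hnd).1 hb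
            rw [rccSet_get_ne _ _ _ _ _ _ (by tauto)]
            exact h0 b (List.mem_cons_of_mem _ hb))]
    funext a b
    by_cases hai : a = i
    · subst hai
      by_cases hbj : b = j
      · subst hbj
        have hbnotjs : b ∉ js := (List.nodup_cons.mp hnd).1
        rw [if_neg (by tauto), if_pos ⟨rfl, List.mem_cons_self⟩, rccSet_get]
      · by_cases hmem : b ∈ js
        · rw [if_pos ⟨rfl, hmem⟩, if_pos ⟨rfl, List.mem_cons_of_mem _ hmem⟩]
        · rw [if_neg (by tauto), if_neg (by simp only [List.mem_cons]; tauto),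
             rccSet_get_ne _ _ _ _ _ _ (by tauto)]
    · rw [if_neg (by tauto), if_neg (by tauto), rccSet_get_ne _ _ _ _ _ _ (by tauto)]

-- the outer row fold establishes the full-table invariant
theorem rcc_rowfold (prices : List Int) (M : Nat) :
    ∀ (k : Nat),
      (List.range' 1 k).foldl (fun (dp : Nat → Nat → Int) (i : Nat) =>
        (List.range (M+1)).foldl (fun (dp : Nat → Nat → Int) (j : Nat) =>
          if 0 < j then
            (List.range' 1 (i-1)).foldl (fun dp c =>
              if c ≤ prices.length then rccSet dp i j (max (dp i j) (prices.getD (c-1) 0 + dp (i-c) (j-1))) else dp)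
              (if i ≤ prices.length then rccSet dp i j (max (dp i j) (prices.getD (i-1) 0)) else dp)
          else if i ≤ prices.length then rccSet dp i j (max (dp i j) (prices.getD (i-1) 0)) else dp) dp)
        (fun _ _ => (0:Int))
      = fun a b => if 1 ≤ a ∧ a ≤ k ∧ b ≤ M then rccBest prices b a else 0 := by
  intro k
  induction k with
  | zero => funext a b; simp only [List.range'_zero, List.foldl_nil]; rw [if_neg (by omega)]
  | succ k ih =>
    rw [List.range'_concat, List.foldl_append, ih]
    simp only [List.foldl_cons, List.foldl_nil, Nat.one_mul]
    rw [rcc_jfold prices M (1+k) (by omega) (List.range (M+1)) _ List.nodup_range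
          (by intro b hb; rw [List.mem_range] at hb; omega)
          (by
            intro a b ha hb
            show (if 1 ≤ a ∧ a ≤ k ∧ b ≤ M then rccBest prices b a else 0) = rccBest prices b a
            by_cases h1 : 1 ≤ a
            · rw [if_pos ⟨h1, by omega, hb⟩]
            · have ha0 : a = 0 := by omega
              subst ha0
              rw [if_neg (by omega)]
              exact (rccBest_zero_len prices b).symm)
          (by
            intro b _
            show (if 1 ≤ 1 + k ∧ 1 + k ≤ k ∧ b ≤ M then rccBest prices b (1+k) else 0) = 0
            rw [if_neg (by omega)])]
    funext a b
    by_cases hb : b ≤ M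
    · by_cases ha : a = 1 + k
      · subst ha
        rw [if_pos ⟨rfl, by rw [List.mem_range]; omega⟩, if_pos ⟨by omega, by omega, hb⟩]
      · rw [if_neg (by tauto)]
        by_cases h1 : 1 ≤ a ∧ a ≤ k
        · rw [if_pos ⟨h1.1, h1.2, hb⟩, if_pos ⟨h1.1, by omega, hb⟩]
        · rw [if_neg (by omega), if_neg (by omega)]
    · have hmem : b ∉ List.range (M+1) := by rw [List.mem_range]; omega
      rw [if_neg (by tauto), if_neg (by tauto), if_neg (by tauto)]

-- bridge from the list table to the function view
def rccFun (dp : List (List Int)) : Nat → Nat → Int := fun a b => rccGet dp a b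

def rccShape (L M : Nat) (dp : List (List Int)) : Prop :=
  dp.length = L + 1 ∧ ∀ r ∈ dp, r.length = M + 1

theorem rccGetD_eq (dp : List (List Int)) (i : Nat) (h : i < dp.length) :
    dp.getD i [] = dp[i] := by
  rw [List.getD_eq_getElem?_getD, List.getElem?_eq_getElem h]
  rfl

theorem rccShape_put (L M : Nat) (dp : List (List Int)) (i j : Nat) (v : Int)
    (h : rccShape L M dp) (hi : i < L + 1) : rccShape L M (rccPut dp i j v) := by
  obtain ⟨h1, h2⟩ := h
  have hil : i < dp.length := by omega
  refine ⟨by simp [rccPut, h1], ?_⟩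
  intro r hr
  rcases List.mem_or_eq_of_mem_set hr with hr' | hr'
  · exact h2 r hr'
  · subst hr'
    rw [List.length_set, rccGetD_eq dp i hil]
    exact h2 _ (List.getElem_mem hil)

theorem rccGet_put (L M : Nat) (dp : List (List Int)) (i j : Nat) (v : Int)
    (h : rccShape L M dp) (hi : i < L + 1) (hj : j < M + 1) (a b : Nat) :
    rccGet (rccPut dp i j v) a b = if a = i ∧ b = j then v else rccGet dp a b := by
  obtain ⟨h1, h2⟩ := h
  have hil : i < dp.length := by omega
  have hrow : (dp[i]?.getD []).length = M + 1 := by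
    simp only [List.getElem?_eq_getElem hil, Option.getD_some]
    exact h2 _ (List.getElem_mem hil)
  unfold rccGet rccPut
  simp only [List.getD_eq_getElem?_getD, List.getElem?_set]
  by_cases hai : a = i
  · subst hai
    rw [if_pos rfl, if_pos hil]
    simp only [Option.getD_some, List.getElem?_set]
    by_cases hbj : b = j
    · subst hbj
      rw [if_pos rfl, if_pos (by rw [hrow]; omega)]
      simp
    · rw [if_neg (show ¬ j = b from by omega), if_neg (by tauto)]
  · rw [if_neg (show ¬ i = a from by omega), if_neg (by tauto)]

theorem rccFun_init (L M : Nat) :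
    rccFun (List.replicate (L+1) (List.replicate (M+1) (0:Int))) = fun _ _ => (0:Int) := by
  funext a b
  show ((List.replicate (L+1) (List.replicate (M+1) (0:Int))).getD a []).getD b 0 = 0
  simp only [List.getD_eq_getElem?_getD, List.getElem?_replicate]
  by_cases ha : a < L + 1
  · rw [if_pos ha]
    simp only [Option.getD_some, List.getElem?_replicate]
    by_cases hb : b < M + 1
    · rw [if_pos hb]; rfl
    · rw [if_neg hb]; rfl
  · rw [if_neg ha]; rfl

theorem rccShape_init (L M : Nat) :
    rccShape L M (List.replicate (L+1) (List.replicate (M+1) (0:Int))) := by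
  refine ⟨by simp, ?_⟩
  intro r hr
  rw [List.eq_of_mem_replicate hr]
  simp

-- a fold on list tables is simulated by the corresponding fold on function tables
theorem rcc_foldl_sim {β : Type} (P : List (List Int) → Prop)
    (Fl : List (List Int) → β → List (List Int))
    (Ff : (Nat → Nat → Int) → β → (Nat → Nat → Int)) :
    ∀ (xs : List β) (dp : List (List Int)),
      (∀ d x, x ∈ xs → P d → P (Fl d x) ∧ rccFun (Fl d x) = Ff (rccFun d) x) →
      P dp →
      P (xs.foldl Fl dp) ∧ rccFun (xs.foldl Fl dp) = xs.foldl Ff (rccFun dp) := by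
  intro xs
  induction xs with
  | nil => intro dp _ hP; exact ⟨hP, rfl⟩
  | cons x xs ih =>
    intro dp hstep hP
    obtain ⟨hP1, heq⟩ := hstep dp x List.mem_cons_self hP
    simp only [List.foldl_cons]
    have h2 := ih (Fl dp x) (fun d y hy hPd => hstep d y (List.mem_cons_of_mem _ hy) hPd) hP1
    exact ⟨h2.1, by rw [h2.2, heq]⟩

-- the port's list-table fold computes the same table as the function fold
theorem rcc_A_fold (prices : List Int) (L M : Nat) :
    rccFun ((List.range' 1 L).foldl (fun (dp : List (List Int)) (i : Nat) =>
      (List.range (M+1)).foldl (fun (dp : List (List Int)) (j : Nat) =>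
        if 0 < j then
          (List.range' 1 (i-1)).foldl (fun dp c =>
            if c ≤ prices.length then rccPut dp i j (max (rccGet dp i j) (prices.getD (c-1) 0 + rccGet dp (i-c) (j-1))) else dp)
            (if i ≤ prices.length then rccPut dp i j (max (rccGet dp i j) (prices.getD (i-1) 0)) else dp)
        else if i ≤ prices.length then rccPut dp i j (max (rccGet dp i j) (prices.getD (i-1) 0)) else dp) dp)
      (List.replicate (L+1) (List.replicate (M+1) (0:Int))))
    = (List.range' 1 L).foldl (fun (dp : Nat → Nat → Int) (i : Nat) =>
        (List.range (M+1)).foldl (fun (dp : Nat → Nat → Int) (j : Nat) =>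
          if 0 < j then
            (List.range' 1 (i-1)).foldl (fun dp c =>
              if c ≤ prices.length then rccSet dp i j (max (dp i j) (prices.getD (c-1) 0 + dp (i-c) (j-1))) else dp)
              (if i ≤ prices.length then rccSet dp i j (max (dp i j) (prices.getD (i-1) 0)) else dp)
          else if i ≤ prices.length then rccSet dp i j (max (dp i j) (prices.getD (i-1) 0)) else dp) dp)
        (fun _ _ => (0:Int)) := by
  have hmain := rcc_foldl_sim (rccShape L M)
    (fun (dp : List (List Int)) (i : Nat) =>
      (List.range (M+1)).foldl (fun (dp : List (List Int)) (j : Nat) =>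
        if 0 < j then
          (List.range' 1 (i-1)).foldl (fun dp c =>
            if c ≤ prices.length then rccPut dp i j (max (rccGet dp i j) (prices.getD (c-1) 0 + rccGet dp (i-c) (j-1))) else dp)
            (if i ≤ prices.length then rccPut dp i j (max (rccGet dp i j) (prices.getD (i-1) 0)) else dp)
        else if i ≤ prices.length then rccPut dp i j (max (rccGet dp i j) (prices.getD (i-1) 0)) else dp) dp)
    (fun (dp : Nat → Nat → Int) (i : Nat) =>
      (List.range (M+1)).foldl (fun (dp : Nat → Nat → Int) (j : Nat) =>
        if 0 < j then
          (List.range' 1 (i-1)).foldl (fun dp c =>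
            if c ≤ prices.length then rccSet dp i j (max (dp i j) (prices.getD (c-1) 0 + dp (i-c) (j-1))) else dp)
            (if i ≤ prices.length then rccSet dp i j (max (dp i j) (prices.getD (i-1) 0)) else dp)
        else if i ≤ prices.length then rccSet dp i j (max (dp i j) (prices.getD (i-1) 0)) else dp) dp)
    (List.range' 1 L)
    (List.replicate (L+1) (List.replicate (M+1) (0:Int)))
    (by
      intro d i hi hP
      rw [List.mem_range'_1] at hi
      have hiL : i < L + 1 := by omega
      simp only []
      exact rcc_foldl_sim (rccShape L M)
        (fun (dp : List (List Int)) (j : Nat) =>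
          if 0 < j then
            (List.range' 1 (i-1)).foldl (fun dp c =>
              if c ≤ prices.length then rccPut dp i j (max (rccGet dp i j) (prices.getD (c-1) 0 + rccGet dp (i-c) (j-1))) else dp)
              (if i ≤ prices.length then rccPut dp i j (max (rccGet dp i j) (prices.getD (i-1) 0)) else dp)
          else if i ≤ prices.length then rccPut dp i j (max (rccGet dp i j) (prices.getD (i-1) 0)) else dp)
        (fun (dp : Nat → Nat → Int) (j : Nat) =>
          if 0 < j then
            (List.range' 1 (i-1)).foldl (fun dp c =>
              if c ≤ prices.length then rccSet dp i j (max (dp i j) (prices.getD (c-1) 0 + dp (i-c) (j-1))) else dp)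
              (if i ≤ prices.length then rccSet dp i j (max (dp i j) (prices.getD (i-1) 0)) else dp)
          else if i ≤ prices.length then rccSet dp i j (max (dp i j) (prices.getD (i-1) 0)) else dp)
        (List.range (M+1)) d
        (by
          intro d' j hj hP'
          rw [List.mem_range] at hj
          simp only []
          have hdp1 : rccShape L M (if i ≤ prices.length then rccPut d' i j (max (rccGet d' i j) (prices.getD (i-1) 0)) else d')
              ∧ rccFun (if i ≤ prices.length then rccPut d' i j (max (rccGet d' i j) (prices.getD (i-1) 0)) else d')
                = (if i ≤ prices.length then rccSet (rccFun d') i j (max (rccFun d' i j) (prices.getD (i-1) 0)) else rccFun d') := by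
            by_cases hn : i ≤ prices.length
            · rw [if_pos hn, if_pos hn]
              refine ⟨rccShape_put L M d' i j _ hP' hiL, ?_⟩
              funext a b
              show rccGet (rccPut d' i j _) a b = _
              rw [rccGet_put L M d' i j _ hP' hiL hj a b]
              rfl
            · rw [if_neg hn, if_neg hn]
              exact ⟨hP', rfl⟩
          by_cases h0j : 0 < j
          · rw [if_pos h0j, if_pos h0j]
            have hc := rcc_foldl_sim (rccShape L M)
              (fun (dp : List (List Int)) (c : Nat) =>
                if c ≤ prices.length then rccPut dp i j (max (rccGet dp i j) (prices.getD (c-1) 0 + rccGet dp (i-c) (j-1))) else dp)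
              (fun (dp : Nat → Nat → Int) (c : Nat) =>
                if c ≤ prices.length then rccSet dp i j (max (dp i j) (prices.getD (c-1) 0 + dp (i-c) (j-1))) else dp)
              (List.range' 1 (i-1))
              (if i ≤ prices.length then rccPut d' i j (max (rccGet d' i j) (prices.getD (i-1) 0)) else d')
              (by
                intro d'' c _ hP''
                simp only []
                by_cases hcn : c ≤ prices.length
                · rw [if_pos hcn, if_pos hcn]
                  refine ⟨rccShape_put L M d'' i j _ hP'' hiL, ?_⟩
                  funext a b
                  show rccGet (rccPut d'' i j _) a b = _
                  rw [rccGet_put L M d'' i j _ hP'' hiL hj a b]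
                  rfl
                · rw [if_neg hcn, if_neg hcn]
                  exact ⟨hP'', rfl⟩)
              hdp1.1
            exact ⟨hc.1, by rw [hc.2, hdp1.2]⟩
          · rw [if_neg h0j, if_neg h0j]
            exact hdp1)
        hP)
    (rccShape_init L M)
  rw [hmain.2, rccFun_init]

theorem rcc_A_eq (length : Int) (prices : List Int) (max_cuts : Int) :
    rod_cutting_with_constraints length prices max_cuts
    = rccBest prices max_cuts.toNat length.toNat := by
  unfold rod_cutting_with_constraints
  simp only []
  show rccFun _ length.toNat max_cuts.toNat = _
  rw [rcc_A_fold prices length.toNat max_cuts.toNat,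
     rcc_rowfold prices max_cuts.toNat length.toNat]
  show (if 1 ≤ length.toNat ∧ length.toNat ≤ length.toNat ∧ max_cuts.toNat ≤ max_cuts.toNat
        then rccBest prices max_cuts.toNat length.toNat else 0)
      = rccBest prices max_cuts.toNat length.toNat
  by_cases h : 1 ≤ length.toNat
  · rw [if_pos ⟨h, le_refl _, le_refl _⟩]
  · have h0 : length.toNat = 0 := by omega
    rw [if_neg (by omega), h0, rccBest_zero_len]

-- ===== B-side lemmas =====

-- phase 2 of B, as one function of phase 1's output (proof-side view of the let-chain in the port)
def rccVals (prices : List Int) (fr : List (PySem.Set Int) × PySem.Set Int) : PySem.Dict Int Int :=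
  fr.1.reverse.foldl
    (fun prev frontier =>
      frontier.foldl (fun vals i => PySem.Dict.insert vals i (rccCombine prices prev i)) PySem.Dict.empty)
    (fr.2.foldl (fun d i => PySem.Dict.insert d i (rccBase prices i)) PySem.Dict.empty)

theorem rccBase_eq_rccB1 (prices : List Int) (i : Int) (hi : 1 ≤ i) :
    rccBase prices i = rccB1 prices i.toNat := by
  unfold rccBase rccB1
  by_cases h : i ≤ (prices.length : Int)
  · rw [if_pos ⟨hi, h⟩, if_pos (by omega)]
    rw [PySem.List.pyGet?_eq_some_getElem prices (i := i - 1) (by omega) (by omega)]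
    rw [List.getD_eq_getElem _ _ (show i.toNat - 1 < prices.length by omega)]
    simp only [Option.getD_some]
    congr 2
    omega
  · rw [if_neg (by tauto), if_neg (by omega)]

theorem rccBase_eq (prices : List Int) (i : Int) (hi : 0 ≤ i) :
    rccBase prices i = rccBest prices 0 i.toNat := by
  by_cases h0 : i = 0
  · subst h0
    simp [rccBase, rccBest]
  · rw [rccBase_eq_rccB1 prices i (by omega)]
    simp [rccBest, show i.toNat ≠ 0 by omega]

theorem rcc_foldl_if_app (n : Int) (h : Int → Int) :
    ∀ (xs : List Int) (acc : List Int),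
      xs.foldl (fun a c => if c ≤ n then a ++ [h c] else a) acc
      = acc ++ (xs.filter (fun c => decide (c ≤ n))).map h := by
  intro xs
  induction xs with
  | nil => intro acc; simp
  | cons c xs ih =>
    intro acc
    simp only [List.foldl_cons, List.filter_cons]
    by_cases hc : c ≤ n
    · simp [hc, ih, List.append_assoc]
    · simp [hc, ih]

theorem rcc_foldl_app (F : Int → List Int) :
    ∀ (xs : List Int) (acc : List Int),
      xs.foldl (fun a i => a ++ F i) acc = acc ++ xs.flatMap F := by
  intro xs
  induction xs with
  | nil => intro acc; simp
  | cons i xs ih => intro acc; simp [ih, List.append_assoc]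

theorem rcc_mem_next (n : Int) (need : PySem.Set Int) (x : Int) :
    x ∈ rccNext n need ↔ ∃ i ∈ need, ∃ c, 1 ≤ c ∧ c < i ∧ c ≤ n ∧ x = i - c := by
  unfold rccNext
  rw [PySem.Set.mem_ofList]
  have hbody : ∀ (acc : List Int) (i : Int),
      (PySem.List.pyRange 1 i 1).foldl (fun acc c => if c ≤ n then acc ++ [i - c] else acc) acc
      = acc ++ ((PySem.List.pyRange 1 i 1).filter (fun c => decide (c ≤ n))).map (fun c => i - c) := by
    intro acc i; exact rcc_foldl_if_app n _ _ acc
  simp only [hbody]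
  rw [rcc_foldl_app (fun i => ((PySem.List.pyRange 1 i 1).filter (fun c => decide (c ≤ n))).map (fun c => i - c)) need []]
  simp only [List.nil_append, List.mem_flatMap, List.mem_map, List.mem_filter,
    PySem.List.mem_pyRange_one, decide_eq_true_eq]
  constructor
  · rintro ⟨i, hi, c, ⟨⟨h1, h2⟩, h3⟩, rfl⟩
    exact ⟨i, hi, c, h1, h2, h3, rfl⟩
  · rintro ⟨i, hi, c, h1, h2, h3, rfl⟩
    exact ⟨i, hi, c, ⟨⟨h1, h2⟩, h3⟩, rfl⟩

theorem rcc_get?_foldl_insert (f : Int → Int) :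
    ∀ (l : List Int) (d : PySem.Dict Int Int) (x : Int),
      (l.foldl (fun d i => PySem.Dict.insert d i (f i)) d).get? x
      = if x ∈ l then some (f x) else d.get? x := by
  intro l
  induction l with
  | nil => intro d x; simp
  | cons i l ih =>
    intro d x
    simp only [List.foldl_cons]
    rw [ih]
    by_cases hx : x ∈ l
    · rw [if_pos hx, if_pos (List.mem_cons_of_mem _ hx)]
    · rw [if_neg hx, PySem.Dict.get?_insert]
      by_cases hxi : x = i
      · subst hxi; simp
      · rw [if_neg hxi, if_neg (by simp [List.mem_cons, hxi, hx])]

theorem rcc_combine_eq (prices : List Int) (prev : PySem.Dict Int Int) (J : Nat) (i : Int)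
    (hi : 0 ≤ i)
    (hprev : ∀ c : Int, 1 ≤ c → c < i → c ≤ (prices.length : Int) →
      prev.get? (i - c) = some (rccBest prices J (i - c).toNat)) :
    rccCombine prices prev i = rccBest prices (J + 1) i.toNat := by
  by_cases h0 : i = 0
  · subst h0
    simp [rccCombine, PySem.List.pyRange_one_eq_nil (by omega : (0:Int) ≤ 1), rccBase, rccBest]
  · have h1 : 1 ≤ i := by omega
    unfold rccCombine
    rw [PySem.List.pyRange_one 1 i, List.foldl_map]
    have hR : rccBest prices (J + 1) i.toNat
        = (List.range' 1 (i.toNat - 1)).foldl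
            (fun acc c => if c ≤ prices.length then max acc (prices.getD (c-1) 0 + rccBest prices J (i.toNat - c)) else acc)
            (rccB1 prices i.toNat) := by
      simp [rccBest, show i.toNat ≠ 0 by omega]
    rw [hR, List.range'_eq_map_range, List.foldl_map]
    rw [rccBase_eq_rccB1 prices i h1]
    have hm : (i - 1).toNat = i.toNat - 1 := by omega
    rw [hm]
    apply PySem.List.foldl_congr_mem
    intro acc k hk
    rw [List.mem_range] at hk
    by_cases hg : (1 : Int) + k ≤ (prices.length : Int)
    · rw [if_pos hg, if_pos (by omega)]
      have e1 : (PySem.List.pyGet? prices (1 + (k : Int) - 1)).getD 0 = prices.getD (1 + k - 1) 0 := by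
        rw [show (1 : Int) + (k : Int) - 1 = ((k : Int)) by ring]
        rw [PySem.List.pyGet?_eq_some_getElem prices (i := (k : Int)) (by omega) (by omega)]
        rw [List.getD_eq_getElem _ _ (show 1 + k - 1 < prices.length by omega)]
        simp only [Option.getD_some]
        congr 1
        omega
      have e2 : prev.getD (i - (1 + (k : Int))) 0 = rccBest prices J (i.toNat - (1 + k)) := by
        rw [PySem.Dict.getD_eq_get?_getD,
            hprev (1 + (k : Int)) (by omega) (by omega) hg]
        simp only [Option.getD_some]
        congr 1
        omega
      rw [e1, e2]
    · rw [if_neg hg, if_neg (by omega)]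

theorem rcc_main (prices : List Int) :
    ∀ (N : Nat) (j : Int) (need : PySem.Set Int),
      j.toNat ≤ N → (∀ i ∈ need, 0 ≤ i) → ∀ x ∈ need,
      (rccVals prices (rccFrontiers (prices.length : Int) j need)).get? x
        = some (rccBest prices j.toNat x.toNat) := by
  intro N
  induction N with
  | zero =>
    intro j need hN hpos x hx
    have hj : ¬ 0 < j := by omega
    rw [rccFrontiers, dif_neg (by tauto)]
    unfold rccVals
    simp only [List.reverse_nil, List.foldl_nil]
    simp only [rcc_get?_foldl_insert]
    rw [if_pos hx, rccBase_eq prices x (hpos x hx), show j.toNat = 0 by omega]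
  | succ N ih =>
    intro j need hN hpos x hx
    by_cases h : 0 < j ∧ need ≠ []
    · rw [rccFrontiers, dif_pos h]
      unfold rccVals
      simp only [List.reverse_cons, List.foldl_append, List.foldl_cons, List.foldl_nil]
      simp only [rcc_get?_foldl_insert]
      rw [if_pos hx]
      have hpos' : ∀ y ∈ rccNext (prices.length : Int) need, 0 ≤ y := by
        intro y hy
        rw [rcc_mem_next] at hy
        obtain ⟨i, _, c, h1, h2, _, rfl⟩ := hy
        omega
      have hcomb := rcc_combine_eq prices
        (rccVals prices (rccFrontiers (prices.length : Int) (j-1) (rccNext (prices.length : Int) need)))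
        (j-1).toNat x (hpos x hx)
        (by
          intro c h1 h2 h3
          exact ih (j-1) (rccNext (prices.length : Int) need) (by omega) hpos' (x - c)
            ((rcc_mem_next _ _ _).mpr ⟨x, hx, c, h1, h2, h3, rfl⟩))
      have hfold : (List.foldl
            (fun prev frontier => List.foldl (fun vals i => PySem.Dict.insert vals i (rccCombine prices prev i)) PySem.Dict.empty frontier)
            (List.foldl (fun d i => PySem.Dict.insert d i (rccBase prices i)) PySem.Dict.empty
              (rccFrontiers (prices.length : Int) (j-1) (rccNext (prices.length : Int) need)).2)
            (rccFrontiers (prices.length : Int) (j-1) (rccNext (prices.length : Int) need)).1.reverse)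
          = rccVals prices (rccFrontiers (prices.length : Int) (j-1) (rccNext (prices.length : Int) need)) := rfl
      rw [hfold, hcomb, show (j-1).toNat + 1 = j.toNat by omega]
    · rcases not_and_or.mp h with hj | hne
      · rw [rccFrontiers, dif_neg (by tauto)]
        unfold rccVals
        simp only [List.reverse_nil, List.foldl_nil]
        simp only [rcc_get?_foldl_insert]
        rw [if_pos hx, rccBase_eq prices x (hpos x hx), show j.toNat = 0 by omega]
      · rw [not_not.mp hne] at hx
        simp at hx

theorem rcc_B_eq (length : Int) (prices : List Int) (max_cuts : Int) (h0 : 0 ≤ length) :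
    rod_cutting_with_constraints_alt length prices max_cuts
    = rccBest prices max_cuts.toNat length.toNat := by
  have hset : PySem.Set.ofList [length] = [length] := rfl
  have hmain := rcc_main prices max_cuts.toNat max_cuts [length] (le_refl _)
    (by intro i hi; rw [List.mem_singleton] at hi; omega)
    length (List.mem_singleton.mpr rfl)
  show ((rccVals prices (rccFrontiers (prices.length : Int) max_cuts (PySem.Set.ofList [length]))).get? length).getD 0 = _
  rw [hset, hmain]
  rfl

-- ===== VERDICT (by name: the statement is the Claim_ definition above) =====
theorem rod_cutting_with_constraints_spec : Claim_equal_rod_cutting_with_constraints := by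
  intro length prices max_cuts _ hpre
  unfold Spec_rod_cutting_with_constraints
  rw [rcc_A_eq, rcc_B_eq length prices max_cuts hpre.1]
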